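-- pv_equiv track=rewrite | github.com/code-for-india/meriawaaz | pythonapiserver/saferoute/routefinder/probabilityfinder.py | calc_incident_weight
-- ===== SOURCE A (Python) =====
-- weights_dict = {u'Whistling': 2, u'Sexual Invites': 6, u'Poor / No Street Lighting': 5, u'Catcalls/Whistles': 2, u'Molestation': 7,
--                 u'Ogling/Facial Expressions': 4, u'Commenting': 3, u'Indecent exposure': 6, u'Rape / Sexual Assault': 10,
--                 u'Chain Snatching': 7, u'Eve teasing': 5,
--                 u'Touching /Groping': 6, u'Taking pictures': 4, u'Gold snatch ': 5, u'Rape': 10, u'Theft ': 7}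
--
-- def calc_incident_weight(incidents):
--     total_incident_weight = 0
--     for incident in incidents:
--         all_incident_type = incident["incident_types"]
--         if all_incident_type:
--             all_incident_type = all_incident_type.split(',')
--             for incident_type in all_incident_type:
--                 if incident_type in weights_dict:
--                     total_incident_weight += weights_dict[incident_type]
--     return total_incident_weight
-- ===== SOURCE B (Python) =====
-- weights_dict = {u'Whistling': 2, u'Sexual Invites': 6, u'Poor / No Street Lighting': 5, u'Catcalls/Whistles': 2, u'Molestation': 7,
--                 u'Ogling/Facial Expressions': 4, u'Commenting': 3, u'Indecent exposure': 6, u'Rape / Sexual Assault': 10,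
--                 u'Chain Snatching': 7, u'Eve teasing': 5,
--                 u'Touching /Groping': 6, u'Taking pictures': 4, u'Gold snatch ': 5, u'Rape': 10, u'Theft ': 7}
--
-- def calc_incident_weight(incidents):
--     # pass 1: build a frequency table of all incident type strings
--     counts = {}
--     for incident in incidents:
--         types = incident["incident_types"]
--         if types:
--             for t in types.split(','):
--                 counts[t] = counts.get(t, 0) + 1
--     # pass 2: weight the table
--     return sum(c * weights_dict[t] for t, c in counts.items() if t in weights_dict)
-- ===== Notes on version B (the rewrite author's own statement) =====
-- stated objective: alternative
-- what changed: B separates counting from weighting: a first pass builds a frequency table of type strings across all incidents, and a second pass sums count*weight over the table's entries that appear in weights_dict, instead of A's single pass with a running total.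
import Mathlib
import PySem

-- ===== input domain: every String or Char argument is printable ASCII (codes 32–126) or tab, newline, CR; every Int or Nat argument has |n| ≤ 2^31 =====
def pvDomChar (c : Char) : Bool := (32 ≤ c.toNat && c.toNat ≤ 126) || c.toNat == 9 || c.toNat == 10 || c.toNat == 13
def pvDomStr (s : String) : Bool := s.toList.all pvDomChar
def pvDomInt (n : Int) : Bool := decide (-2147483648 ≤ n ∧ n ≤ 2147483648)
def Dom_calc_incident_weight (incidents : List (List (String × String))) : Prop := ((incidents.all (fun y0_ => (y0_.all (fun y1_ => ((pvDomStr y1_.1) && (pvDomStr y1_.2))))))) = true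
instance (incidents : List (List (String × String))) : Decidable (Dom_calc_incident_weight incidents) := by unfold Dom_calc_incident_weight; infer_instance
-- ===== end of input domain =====

-- B changes the decomposition: a first pass builds a frequency table of the type strings, a second pass weights it; A keeps one running total.

-- shared module-level constant weights_dict
def pvWeights : PySem.Dict String Int := PySem.Dict.ofList
  [("Whistling", 2), ("Sexual Invites", 6), ("Poor / No Street Lighting", 5), ("Catcalls/Whistles", 2),
   ("Molestation", 7), ("Ogling/Facial Expressions", 4), ("Commenting", 3), ("Indecent exposure", 6),
   ("Rape / Sexual Assault", 10), ("Chain Snatching", 7), ("Eve teasing", 5), ("Touching /Groping", 6),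
   ("Taking pictures", 4), ("Gold snatch ", 5), ("Rape", 10), ("Theft ", 7)]

-- s.split(',') — PySem.Str.split? is none only for sep = "", so getD [] is exact here
def pvSplit (s : String) : List String := (PySem.Str.split? s ",").getD []

-- ===== PORT A =====
def calc_incident_weight (incidents : List (List (String × String))) : Int :=
  incidents.foldl (fun total_incident_weight incident =>
    -- incident["incident_types"]: first-match lookup; KeyError (missing key) is excluded by Pre_
    let all_incident_type := (List.lookup "incident_types" incident).getD ""
    if all_incident_type ≠ "" then
      (pvSplit all_incident_type).foldl (fun t incident_type =>
        if PySem.Dict.contains pvWeights incident_type then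
          t + PySem.Dict.getD pvWeights incident_type 0
        else t) total_incident_weight
    else total_incident_weight) 0

-- ===== PORT B =====
-- B pass 1: the frequency table  counts[t] = counts.get(t, 0) + 1
def pvCounts (incidents : List (List (String × String))) : PySem.Dict String Int :=
  incidents.foldl (fun counts incident =>
    let types := (List.lookup "incident_types" incident).getD ""   -- KeyError excluded by Pre_
    if types ≠ "" then
      (pvSplit types).foldl (fun d t => d.insert t (d.getD t 0 + 1)) counts
    else counts) PySem.Dict.empty

def calc_incident_weight_alt (incidents : List (List (String × String))) : Int :=
  (pvCounts incidents).items.foldl (fun acc p =>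
    if PySem.Dict.contains pvWeights p.1 then acc + p.2 * PySem.Dict.getD pvWeights p.1 0 else acc) 0

-- ===== PRECONDITION & SPEC =====
-- Pre_ excludes inputs where some incident lacks the key "incident_types": there the Python raises KeyError.
def Pre_calc_incident_weight (incidents : List (List (String × String))) : Prop :=
  (incidents.all (fun incident => (List.lookup "incident_types" incident).isSome)) = true
instance (incidents : List (List (String × String))) : Decidable (Pre_calc_incident_weight incidents) := by unfold Pre_calc_incident_weight; infer_instance
def pvWitness_calc_incident_weight : (List (List (String × String))) :=
  [[("incident_types", "Rape,Whistling")], [("incident_types", "")]]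
def Spec_calc_incident_weight (incidents : List (List (String × String))) (out : Int) : Prop := out = calc_incident_weight_alt incidents
instance (incidents : List (List (String × String))) (out : Int) : Decidable (Spec_calc_incident_weight incidents out) := by unfold Spec_calc_incident_weight; infer_instance

-- ===== CLAIM (what is proved, stated in full; the proofs are below) =====
def Claim_equal_calc_incident_weight : Prop := ∀ (incidents : List (List (String × String))), Dom_calc_incident_weight incidents → Pre_calc_incident_weight incidents → Spec_calc_incident_weight incidents (calc_incident_weight incidents)

-- ===== LEMMAS AND PROOFS =====

-- weight of a single type string (0 if unknown)
def pvW (t : String) : Int :=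
  if PySem.Dict.contains pvWeights t then PySem.Dict.getD pvWeights t 0 else 0

-- the list of type strings an incident contributes
def pvTypes (incident : List (String × String)) : List String :=
  let s := (List.lookup "incident_types" incident).getD ""
  if s ≠ "" then pvSplit s else []

lemma inner_foldl_eq (ts : List String) (acc : Int) :
    ts.foldl (fun t incident_type =>
      if PySem.Dict.contains pvWeights incident_type then
        t + PySem.Dict.getD pvWeights incident_type 0
      else t) acc = acc + (ts.map pvW).sum := by
  induction ts generalizing acc with
  | nil => simp
  | cons x xs ih =>
    simp only [List.foldl_cons, List.map_cons, List.sum_cons, ih, pvW]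
    split <;> ring

-- A computes the plain weight-sum of the flattened type list
lemma foldl_add_sum {α : Type} (g : α → Int) (l : List α) (acc : Int) :
    l.foldl (fun tw x => tw + g x) acc = acc + (l.map g).sum := by
  induction l generalizing acc with
  | nil => simp
  | cons x xs ih => simp [ih]; ring

lemma sum_map_flatMap {α β : Type} (f : α → List β) (g : β → Int) (l : List α) :
    ((l.flatMap f).map g).sum = (l.map (fun x => ((f x).map g).sum)).sum := by
  induction l with
  | nil => rfl
  | cons x xs ih => simp [ih]

-- A computes the plain weight-sum of the flattened type list
lemma a_char (incidents : List (List (String × String))) :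
    calc_incident_weight incidents = ((incidents.flatMap pvTypes).map pvW).sum := by
  unfold calc_incident_weight
  have hfun : (fun (total_incident_weight : Int) (incident : List (String × String)) =>
      let all_incident_type := (List.lookup "incident_types" incident).getD ""
      if all_incident_type ≠ "" then
        (pvSplit all_incident_type).foldl (fun t incident_type =>
          if PySem.Dict.contains pvWeights incident_type then
            t + PySem.Dict.getD pvWeights incident_type 0
          else t) total_incident_weight
      else total_incident_weight)
      = fun tw incident => tw + ((pvTypes incident).map pvW).sum := by
    funext tw incident
    by_cases hs : (List.lookup "incident_types" incident).getD "" = ""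
    · simp [hs, pvTypes]
    · simp [hs, pvTypes, inner_foldl_eq]
  rw [hfun, foldl_add_sum, sum_map_flatMap]
  simp

lemma counts_foldl (incidents : List (List (String × String))) :
    pvCounts incidents
    = (incidents.flatMap pvTypes).foldl (fun d t => d.insert t (d.getD t 0 + 1)) PySem.Dict.empty := by
  unfold pvCounts
  suffices h : ∀ d0 : PySem.Dict String Int, incidents.foldl (fun counts incident =>
      let types := (List.lookup "incident_types" incident).getD ""
      if types ≠ "" then
        (pvSplit types).foldl (fun d t => d.insert t (d.getD t 0 + 1)) counts
      else counts) d0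
      = (incidents.flatMap pvTypes).foldl (fun d t => d.insert t (d.getD t 0 + 1)) d0 by
    exact h PySem.Dict.empty
  induction incidents with
  | nil => intro d0; rfl
  | cons inc rest ih =>
    intro d0
    rw [List.foldl_cons, ih, List.flatMap_cons, List.foldl_append]
    congr 1
    by_cases hs : (List.lookup "incident_types" inc).getD "" = "" <;> simp [pvTypes, hs]

-- if-sum over a nodup list containing x picks out c once
lemma sum_ite_single (l : List String) (x : String) (c : Int) (hnd : l.Nodup) (hx : x ∈ l) :
    (l.map (fun k => if k = x then c else 0)).sum = c := by
  induction l with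
  | nil => cases hx
  | cons y ys ih =>
    have hnd' := List.nodup_cons.mp hnd
    rcases List.mem_cons.mp hx with h | h
    · subst h
      have h0 : (ys.map (fun k => if k = x then c else 0)).sum = 0 := by
        apply List.sum_eq_zero
        intro v hv
        obtain ⟨k, hk, rfl⟩ := List.mem_map.mp hv
        exact if_neg (fun e => hnd'.1 (by rw [← e]; exact hk))
      simp [h0]
    · have hyx : y ≠ x := fun e => hnd'.1 (e ▸ h)
      simp only [List.map_cons, List.sum_cons, if_neg hyx, zero_add]
      exact ih hnd'.2 h

-- sum over a nodup key list covering xs of count · weight = plain weight sum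
lemma sum_count_mul (xs : List String) : ∀ (l : List String), (∀ a ∈ xs, a ∈ l) → l.Nodup →
    (l.map (fun k => ((xs.count k : Int)) * pvW k)).sum = (xs.map pvW).sum := by
  induction xs with
  | nil => intro l _ _; simp
  | cons x rest ih =>
    intro l hl hnd
    have hx : x ∈ l := hl x (by simp)
    have step : ∀ k : String, (((x :: rest).count k : Int)) * pvW k
        = ((rest.count k : Int)) * pvW k + (if k = x then pvW x else 0) := by
      intro k
      by_cases hkx : k = x
      · subst hkx; simp; ring
      · have hxk : ¬ x = k := fun e => hkx e.symm
        have : (x :: rest).count k = rest.count k := by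
          simp [hxk]
        rw [this, if_neg hkx, add_zero]
    calc (l.map (fun k => (((x :: rest).count k : Int)) * pvW k)).sum
        = (l.map (fun k => ((rest.count k : Int)) * pvW k + (if k = x then pvW x else 0))).sum := by
          exact congrArg List.sum (List.map_congr_left (fun k _ => step k))
      _ = (l.map (fun k => ((rest.count k : Int)) * pvW k)).sum
          + (l.map (fun k => if k = x then pvW x else 0)).sum := by
          rw [← List.sum_map_add]
      _ = (rest.map pvW).sum + pvW x := by
          rw [ih l (fun a ha => hl a (by simp [ha])) hnd, sum_ite_single l x (pvW x) hnd hx]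
      _ = ((x :: rest).map pvW).sum := by simp; ring

-- folding B's weighting step over any pair list is acc + Σ c·w
lemma pairs_foldl_eq (pairs : List (String × Int)) (acc : Int) :
    pairs.foldl (fun acc p =>
      if PySem.Dict.contains pvWeights p.1 then acc + p.2 * PySem.Dict.getD pvWeights p.1 0 else acc) acc
    = acc + (pairs.map (fun p => p.2 * pvW p.1)).sum := by
  induction pairs generalizing acc with
  | nil => simp
  | cons p ps ih =>
    simp only [List.foldl_cons, List.map_cons, List.sum_cons, ih, pvW]
    split <;> ring

lemma b_char (incidents : List (List (String × String))) :
    calc_incident_weight_alt incidents = ((incidents.flatMap pvTypes).map pvW).sum := by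
  unfold calc_incident_weight_alt
  rw [counts_foldl, PySem.Dict.foldl_insert_getD_add_one_eq_counter, pairs_foldl_eq,
      PySem.Dict.items_counter, List.map_map]
  have hcomp : ((fun p : String × Int => p.2 * pvW p.1) ∘
      fun k => (k, ((incidents.flatMap pvTypes).count k : Int)))
      = fun k => ((incidents.flatMap pvTypes).count k : Int) * pvW k := rfl
  rw [hcomp, sum_count_mul (incidents.flatMap pvTypes) (PySem.Set.ofList (incidents.flatMap pvTypes))
        (fun a ha => (PySem.Set.mem_ofList _ _).mpr ha) (PySem.Set.nodup_ofList _)]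
  simp

-- ===== VERDICT (by name: the statement is the Claim_ definition above) =====
theorem calc_incident_weight_spec : Claim_equal_calc_incident_weight := by
  intro incidents _ _
  unfold Spec_calc_incident_weight
  rw [a_char, b_char]
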